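-- pv_equiv track=rewrite | github.com/cristi2019255/Frequent_Itemset_Mining_Big_Data | main.py | get_d_bound
-- ===== SOURCE A (Python) =====
-- def get_d_bound(D):
--     ## Computing the d-bound
--     L = {}
--     for transaction in D:
--        l = len(transaction)
--        if l in L.keys():
--            L[l] += 1
--        else:
--            L[l] = 1
--
--        for i in range(1,l):
--         if i in L.keys():
--             L[i] += 1
--         else:
--             L[i] = 1
--     keys = list(L.keys())[:]
--     for key in keys:
--         if L[key] < key:
--             L.pop(key)
--     return max(L.keys())
-- ===== SOURCE B (Python) =====
-- def get_d_bound(D):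
--     # Length histogram + downward suffix-count scan: O(n + maxlen)
--     hist = {}
--     for t in D:
--         l = len(t)
--         hist[l] = hist.get(l, 0) + 1
--     maxlen = max(hist)
--     count = 0
--     for k in range(maxlen, 0, -1):
--         count += hist.get(k, 0)
--         if count >= k:
--             return k
--     return 0
-- ===== Notes on version B (the rewrite author's own statement) =====
-- stated objective: faster
-- what changed: A increments a dict entry for every i in 1..len(t) of every transaction (cost = sum of transaction lengths) and then filters and maxes the keys; B builds only a histogram of transaction lengths and scans it downward accumulating suffix counts, returning the first k with count >= k.
-- outside the precondition, e.g. on get_d_bound([]): A raises ValueError, B raises ValueError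
import Mathlib
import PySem

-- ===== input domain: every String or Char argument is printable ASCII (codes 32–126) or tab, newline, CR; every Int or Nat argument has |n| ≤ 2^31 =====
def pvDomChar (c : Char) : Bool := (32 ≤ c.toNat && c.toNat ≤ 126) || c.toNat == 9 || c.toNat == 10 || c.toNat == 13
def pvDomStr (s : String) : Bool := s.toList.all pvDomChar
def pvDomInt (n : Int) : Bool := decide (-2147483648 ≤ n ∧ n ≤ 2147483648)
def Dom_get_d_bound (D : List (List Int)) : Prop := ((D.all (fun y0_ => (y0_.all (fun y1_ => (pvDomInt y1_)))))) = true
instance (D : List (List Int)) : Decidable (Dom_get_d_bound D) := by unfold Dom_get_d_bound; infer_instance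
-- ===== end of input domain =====

-- B replaces A's per-element dict increments by a histogram of transaction lengths
-- plus one downward suffix-count scan (objective: faster by algorithm change).

-- ===== PORT A =====
-- `if x in L.keys(): L[x] += 1 else: L[x] = 1`
def pvAStep (L : PySem.Dict Int Int) (x : Int) : PySem.Dict Int Int :=
  if L.contains x then L.insert x (L.getD x 0 + 1) else L.insert x 1

def get_d_bound (D : List (List Int)) : Int :=
  let L : PySem.Dict Int Int :=
    D.foldl (fun L t =>
      let l : Int := t.length
      let L := pvAStep L l
      (PySem.List.pyRange 1 l).foldl (fun L i => pvAStep L i) L)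
      PySem.Dict.empty
  let keys := L.keys
  let L := keys.foldl (fun L key => if L.getD key 0 < key then L.erase key else L) L
  -- max(L.keys()): raises ValueError on an empty dict (D = []), excluded by Pre_; 0 is a junk default
  (PySem.List.max? L.keys (fun k => k)).getD 0

-- ===== PORT B =====
-- `for k in range(maxlen, 0, -1): count += hist.get(k, 0); if count >= k: return k` / `return 0`
def pvBLoop (hist : PySem.Dict Int Int) : Nat → Int → Int
  | 0, _ => 0
  | k+1, count =>
    let count := count + hist.getD ((k : Int) + 1) 0
    if ((k : Int) + 1) ≤ count then (k : Int) + 1 else pvBLoop hist k count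

def get_d_bound_alt (D : List (List Int)) : Int :=
  let hist : PySem.Dict Int Int :=
    D.foldl (fun h t => h.insert (t.length : Int) (h.getD (t.length : Int) 0 + 1)) PySem.Dict.empty
  -- max(hist): raises ValueError on an empty dict (D = []), excluded by Pre_; 0 is a junk default
  let maxlen : Int := (PySem.List.max? hist.keys (fun k => k)).getD 0
  pvBLoop hist maxlen.toNat 0

-- ===== PRECONDITION & SPEC =====
-- Both A and B raise ValueError (max of an empty sequence) on D = []; Pre_ excludes exactly that input.
def Pre_get_d_bound (D : List (List Int)) : Prop := D ≠ []
instance (D : List (List Int)) : Decidable (Pre_get_d_bound D) := by unfold Pre_get_d_bound; infer_instance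
def pvWitness_get_d_bound : List (List Int) := [[1, 2], [3]]

def Spec_get_d_bound (D : List (List Int)) (out : Int) : Prop := out = get_d_bound_alt D
instance (D : List (List Int)) (out : Int) : Decidable (Spec_get_d_bound D out) := by unfold Spec_get_d_bound; infer_instance

-- ===== CLAIM (what is proved, stated in full; the proofs are below) =====
def Claim_equal_get_d_bound : Prop := ∀ (D : List (List Int)), Dom_get_d_bound D → Pre_get_d_bound D → Spec_get_d_bound D (get_d_bound D)

-- ===== LEMMAS AND PROOFS =====

-- the multiset of keys A increments: for each transaction, its length l and every i in range(1, l)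
def pvIncs (D : List (List Int)) : List Int :=
  D.flatMap (fun t => (t.length : Int) :: PySem.List.pyRange 1 (t.length : Int))

-- the lengths of the transactions, as integers
def pvLens (D : List (List Int)) : List Int := D.map (fun t => (t.length : Int))

-- count of transactions of length ≥ j
def pvCge (L : List Int) (j : Int) : Int := (L.countP (fun x => decide (j ≤ x)) : Int)

-- reference for B's downward scan: greatest j ≤ k with 1 ≤ j and pvCge j ≥ j, else 0
def pvRef (L : List Int) : Nat → Nat
  | 0 => 0
  | k+1 => if ((k : Int) + 1) ≤ pvCge L ((k : Int) + 1) then k + 1 else pvRef L k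

theorem pvAStep_eq (L : PySem.Dict Int Int) (x : Int) :
    pvAStep L x = L.insert x (L.getD x 0 + 1) := by
  unfold pvAStep
  by_cases h : L.contains x
  · simp [h]
  · rw [if_neg (by simp [h]), PySem.Dict.getD_of_not_contains L 0 (by simpa using h)]
    norm_num

theorem pvBuildA_eq (D : List (List Int)) :
    (D.foldl (fun L t =>
      let l : Int := t.length
      let L := pvAStep L l
      (PySem.List.pyRange 1 l).foldl (fun L i => pvAStep L i) L)
      PySem.Dict.empty)
    = (pvIncs D).foldl (fun d x => d.insert x (d.getD x 0 + 1)) PySem.Dict.empty := by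
  unfold pvIncs
  rw [List.foldl_flatMap]
  simp only [List.foldl_cons, pvAStep_eq]

theorem pvCount_pyRange_aux (v a : Int) :
    ∀ n : Nat, (PySem.List.pyRange a (a + n)).count v = if a ≤ v ∧ v < a + n then 1 else 0 := by
  intro n
  induction n with
  | zero =>
    have he : PySem.List.pyRange a (a + ((0:Nat):Int)) = [] := by
      apply List.eq_nil_iff_forall_not_mem.2
      intro x hx
      rw [PySem.List.mem_pyRange_one] at hx
      omega
    rw [he, if_neg (by omega)]
    rfl
  | succ n ih =>
    have e : (a + ((n+1:Nat):Int)) = (a + n) + 1 := by push_cast; ring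
    rw [e, PySem.List.pyRange_one_succ_right (by omega), List.count_append, ih]
    simp only [List.count_cons, List.count_nil, beq_iff_eq]
    split_ifs <;> omega

theorem pvCount_pyRange (v a b : Int) :
    (PySem.List.pyRange a b).count v = if a ≤ v ∧ v < b then 1 else 0 := by
  by_cases h : b ≤ a
  · have he : PySem.List.pyRange a b = [] := by
      apply List.eq_nil_iff_forall_not_mem.2
      intro x hx
      rw [PySem.List.mem_pyRange_one] at hx
      omega
    rw [he, if_neg (by omega)]
    rfl
  · have e : b = a + (((b - a).toNat : Nat) : Int) := by omega
    rw [e]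
    exact pvCount_pyRange_aux v a (b - a).toNat

theorem pvCount_incs (D : List (List Int)) (v : Int) :
    (pvIncs D).count v =
      if v = 0 then (pvLens D).count 0
      else if 1 ≤ v then (pvLens D).countP (fun x => decide (v ≤ x))
      else 0 := by
  induction D with
  | nil => simp [pvIncs, pvLens]
  | cons t D ih =>
    simp only [pvIncs, pvLens, List.flatMap_cons, List.map_cons, List.count_append,
      List.count_cons, List.countP_cons] at *
    rw [ih, pvCount_pyRange]
    have h0 : (0:Int) ≤ (t.length : Int) := by positivity
    split_ifs <;> simp_all <;> omega

-- keys of a dict after erasing k: the old keys with k removed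
theorem pvKeys_erase (d : PySem.Dict Int Int) (k : Int) :
    (d.erase k).keys = d.keys.filter (fun x => !(x == k)) := by
  show ((d.items.filter (fun p => !(p.1 == k))).map (fun p => p.1))
      = (d.items.map (fun p => p.1)).filter (fun x => !(x == k))
  induction d.items with
  | nil => rfl
  | cons a l ih =>
    by_cases h : a.1 == k <;> simp [h, ih]

theorem pvGetD_erase_ne (d : PySem.Dict Int Int) (k k' : Int) (h : k' ≠ k) (d0 : Int) :
    (d.erase k).getD k' d0 = d.getD k' d0 := by
  show (Option.map (fun p => p.2)
      ((d.items.filter (fun p => !(p.1 == k))).find? (fun p => p.1 == k'))).getD d0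
    = (Option.map (fun p => p.2) (d.items.find? (fun p => p.1 == k'))).getD d0
  induction d.items with
  | nil => rfl
  | cons a l ih =>
    rw [List.filter_cons]
    by_cases hk : a.1 = k
    · rw [if_neg (by simp [hk])]
      have hk' : (a.1 == k') = false := by simp [hk]; omega
      rw [List.find?_cons, hk']
      exact ih
    · rw [if_pos (by simp [hk])]
      by_cases h1 : a.1 = k'
      · have h1' : (a.1 == k') = true := by simp [h1]
        rw [List.find?_cons, h1', List.find?_cons, h1']
      · have h1' : (a.1 == k') = false := by simp [h1]
        rw [List.find?_cons, h1', List.find?_cons, h1']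
        exact ih

theorem pvEraseFold (ks : List Int) (d : PySem.Dict Int Int) (hnd : ks.Nodup) :
    (ks.foldl (fun L key => if L.getD key 0 < key then L.erase key else L) d).keys
      = d.keys.filter (fun k => !(ks.contains k) || !(decide (d.getD k 0 < k))) := by
  induction ks generalizing d with
  | nil => simp
  | cons a ks ih =>
    have hna : a ∉ ks := (List.nodup_cons.1 hnd).1
    have hnd' : ks.Nodup := (List.nodup_cons.1 hnd).2
    simp only [List.foldl_cons]
    by_cases h : d.getD a 0 < a
    · rw [if_pos h, ih _ hnd', pvKeys_erase, List.filter_filter]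
      apply List.filter_congr
      intro x _
      rcases eq_or_ne x a with rfl | hxa
      · simp [h]
      · have hxb : (x == a) = false := by simp [hxa]
        rw [pvGetD_erase_ne d a x hxa]
        simp [hxb, hxa]
    · rw [if_neg h, ih _ hnd']
      apply List.filter_congr
      intro x _
      rcases eq_or_ne x a with rfl | hxa
      · simp [h]
      · simp [hxa]

theorem pvEraseFold_keys (d : PySem.Dict Int Int) (hnd : d.keys.Nodup) :
    (d.keys.foldl (fun L key => if L.getD key 0 < key then L.erase key else L) d).keys
      = d.keys.filter (fun k => decide (k ≤ d.getD k 0)) := by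
  rw [pvEraseFold d.keys d hnd]
  apply List.filter_congr
  intro x hx
  by_cases h2 : d.getD x 0 < x
  · simp [hx, h2]
  · simp [hx, h2]
    omega

theorem pvHist_eq (D : List (List Int)) :
    (D.foldl (fun h t => h.insert (t.length : Int) (h.getD (t.length : Int) 0 + 1)) PySem.Dict.empty)
      = PySem.Dict.counter (pvLens D) := by
  unfold pvLens
  rw [← PySem.Dict.foldl_insert_getD_add_one_eq_counter, List.foldl_map]

theorem pvCountP_split (L : List Int) (j : Int) :
    L.countP (fun x => decide (j ≤ x)) = L.countP (fun x => decide (j < x)) + L.count j := by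
  induction L with
  | nil => rfl
  | cons a l ih =>
    simp only [List.countP_cons, List.count_cons, ih, decide_eq_true_eq, beq_iff_eq]
    split_ifs <;> omega

theorem pvBLoop_eq (L : List Int) :
    ∀ (k : Nat) (c : Int), c = (L.countP (fun x => decide ((k : Int) < x)) : Int) →
      pvBLoop (PySem.Dict.counter L) k c = (pvRef L k : Int) := by
  intro k
  induction k with
  | zero => intro c _; rfl
  | succ k ih =>
    intro c hc
    simp only [pvBLoop, pvRef, PySem.Dict.getD_counter]
    have e0 : (((k+1:Nat)) : Int) = (k : Int) + 1 := by push_cast; ring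
    rw [e0] at hc
    have hsplit := pvCountP_split L ((k : Int) + 1)
    have hc' : c + (L.count ((k : Int) + 1) : Int) = pvCge L ((k : Int) + 1) := by
      unfold pvCge
      rw [hsplit]
      push_cast
      omega
    rw [hc']
    by_cases h : ((k : Int) + 1) ≤ pvCge L ((k : Int) + 1)
    · rw [if_pos h, if_pos h]
      omega
    · rw [if_neg h, if_neg h]
      apply ih
      have e2 : L.countP (fun x => decide (((k:Nat):Int) < x))
          = L.countP (fun x => decide ((k : Int) + 1 ≤ x)) := by
        apply List.countP_congr
        intro x _
        by_cases hx : ((k:Nat):Int) < x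
        · simp [hx, show (k:Int) + 1 ≤ x by omega]
        · simp [hx, show ¬((k:Int) + 1 ≤ x) by omega]
      rw [e2]
      rfl

theorem pvRef_le (L : List Int) (k : Nat) : pvRef L k ≤ k := by
  induction k with
  | zero => simp [pvRef]
  | succ k ih =>
    unfold pvRef
    split_ifs <;> omega

theorem pvRef_spec (L : List Int) (k : Nat) (h : 0 < pvRef L k) :
    ((pvRef L k : Nat) : Int) ≤ pvCge L ((pvRef L k : Nat) : Int) := by
  induction k with
  | zero => simp [pvRef] at h
  | succ k ih =>
    unfold pvRef at h ⊢
    by_cases hb : ((k : Int) + 1) ≤ pvCge L ((k : Int) + 1)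
    · rw [if_pos hb]
      push_cast
      exact hb
    · rw [if_neg hb] at h ⊢
      exact ih h

theorem pvRef_greatest (L : List Int) (k : Nat) :
    ∀ j : Nat, 0 < j → j ≤ k → ((j : Int) ≤ pvCge L (j : Int)) → j ≤ pvRef L k := by
  induction k with
  | zero => intro j h1 h2 _; omega
  | succ k ih =>
    intro j h1 h2 h3
    unfold pvRef
    by_cases hb : ((k : Int) + 1) ≤ pvCge L ((k : Int) + 1)
    · rw [if_pos hb]; omega
    · rw [if_neg hb]
      rcases Nat.lt_or_ge j (k+1) with hj | hj
      · exact ih j h1 (by omega) h3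
      · exfalso
        have : j = k + 1 := by omega
        subst this
        apply hb
        convert h3 using 2

theorem pvMem_incs (D : List (List Int)) (v : Int) :
    v ∈ pvIncs D ↔ ∃ x ∈ pvLens D, v = x ∨ (1 ≤ v ∧ v < x) := by
  unfold pvIncs pvLens
  simp only [List.mem_flatMap, List.mem_cons, List.mem_map]
  constructor
  · rintro ⟨t, ht, h | h⟩
    · exact ⟨(t.length : Int), ⟨t, ht, rfl⟩, Or.inl h⟩
    · rw [PySem.List.mem_pyRange_one] at h
      exact ⟨(t.length : Int), ⟨t, ht, rfl⟩, Or.inr ⟨h.1, h.2⟩⟩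
  · rintro ⟨x, ⟨t, ht, rfl⟩, h | h⟩
    · exact ⟨t, ht, Or.inl h⟩
    · exact ⟨t, ht, Or.inr (by rw [PySem.List.mem_pyRange_one]; exact ⟨h.1, h.2⟩)⟩

theorem pvLens_nonneg (D : List (List Int)) : ∀ x ∈ pvLens D, 0 ≤ x := by
  intro x hx
  unfold pvLens at hx
  obtain ⟨t, _, rfl⟩ := List.mem_map.1 hx
  positivity

-- ===== VERDICT (by name: the statement is the Claim_ definition above) =====
theorem get_d_bound_spec : Claim_equal_get_d_bound := by
  intro D _ hpre
  unfold Pre_get_d_bound at hpre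
  unfold Spec_get_d_bound get_d_bound get_d_bound_alt
  rw [pvBuildA_eq, pvHist_eq]
  show (PySem.List.max?
      (((pvIncs D).foldl (fun (d : PySem.Dict Int Int) x => d.insert x (d.getD x 0 + 1)) PySem.Dict.empty).keys.foldl
        (fun L key => if L.getD key 0 < key then L.erase key else L)
        ((pvIncs D).foldl (fun (d : PySem.Dict Int Int) x => d.insert x (d.getD x 0 + 1)) PySem.Dict.empty)).keys
      (fun k => k)).getD 0
    = pvBLoop (PySem.Dict.counter (pvLens D))
        ((PySem.List.max? (PySem.Dict.counter (pvLens D)).keys (fun k => k)).getD 0).toNat 0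
  set L := pvLens D with hL
  have hLne : L ≠ [] := by
    simpa [hL, pvLens] using hpre
  -- B's histogram facts
  have hkeys : (PySem.Dict.counter L).keys = PySem.Set.ofList L := PySem.Dict.keys_counter L
  -- maxlen
  obtain ⟨M, hM⟩ : ∃ M, PySem.List.max? (PySem.Dict.counter L).keys (fun k => k) = some M := by
    cases hmx : PySem.List.max? (PySem.Dict.counter L).keys (fun k => k) with
    | none =>
      exfalso
      rw [PySem.List.max?_eq_none_iff, hkeys] at hmx
      rcases List.exists_mem_of_ne_nil L hLne with ⟨x, hx⟩
      have hmem : x ∈ PySem.Set.ofList L := (PySem.Set.mem_ofList L x).2 hx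
      rw [hmx] at hmem
      simp at hmem
    | some m => exact ⟨m, rfl⟩
  have hMmem : M ∈ L := (PySem.Set.mem_ofList L M).1 (by rw [← hkeys]; exact PySem.List.max?_mem hM)
  have hMmax : ∀ y ∈ L, y ≤ M := by
    intro y hy
    exact PySem.List.max?_isMax hM y (by rw [hkeys]; exact (PySem.Set.mem_ofList L y).2 hy)
  have hM0 : 0 ≤ M := pvLens_nonneg D M hMmem
  have hMcast : ((M.toNat : Nat) : Int) = M := by omega
  rw [hM]
  simp only [Option.getD_some]
  -- B's value = pvRef L M.toNat
  have hB : pvBLoop (PySem.Dict.counter L) M.toNat 0 = (pvRef L M.toNat : Int) := by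
    apply pvBLoop_eq
    have : L.countP (fun x => decide (((M.toNat : Nat) : Int) < x)) = 0 := by
      rw [List.countP_eq_zero]
      intro x hx
      simp only [decide_eq_true_eq]
      have := hMmax x hx
      omega
    rw [this]
    rfl
  rw [hB]
  set m : Nat := pvRef L M.toNat with hm
  -- A's dict after the build
  set dA : PySem.Dict Int Int := (pvIncs D).foldl (fun d x => d.insert x (d.getD x 0 + 1)) PySem.Dict.empty with hdA
  have hAkeys : dA.keys = PySem.Set.ofList (pvIncs D) := by
    rw [hdA, PySem.Dict.keys_foldl_insert (f := fun d x => d.getD x 0 + 1), PySem.Dict.keys_empty]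
    rfl
  have hAgetD : ∀ v, dA.getD v 0 = ((pvIncs D).count v : Int) := by
    intro v
    rw [hdA, PySem.Dict.getD_foldl_insert_add_one, PySem.Dict.getD_empty]
    omega
  have hAnodup : dA.keys.Nodup := by
    rw [hAkeys]; exact PySem.Set.nodup_ofList _
  rw [pvEraseFold_keys dA hAnodup]
  set S := dA.keys.filter (fun k => decide (k ≤ dA.getD k 0)) with hS
  -- membership in S
  have hSmem : ∀ v : Int, v ∈ S ↔ (v ∈ pvIncs D ∧ v ≤ ((pvIncs D).count v : Int)) := by
    intro v
    rw [hS, List.mem_filter, hAkeys, PySem.Set.mem_ofList, hAgetD]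
    simp
  -- cge link: for 1 ≤ v, count in incs = countP in lens
  have hcge : ∀ v : Int, 1 ≤ v → ((pvIncs D).count v : Int) = pvCge L v := by
    intro v hv
    rw [pvCount_incs]
    rw [if_neg (by omega), if_pos hv]
    rfl
  -- the reference value m is in S
  have hmS : ((m : Nat) : Int) ∈ S := by
    rcases Nat.eq_zero_or_pos m with hm0 | hm0
    · -- all transactions empty: 0 ∈ lens
      have hM0' : M = 0 := by
        by_contra hne
        have hM1 : 1 ≤ M := by omega
        have : (1 : Nat) ≤ m := by
          apply pvRef_greatest L M.toNat 1 (by omega) (by omega)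
          unfold pvCge
          have : 0 < L.countP (fun x => decide ((1:Int) ≤ x)) := by
            rw [List.countP_pos_iff]
            exact ⟨M, hMmem, by simpa using hM1⟩
          push_cast
          omega
        omega
      rw [hSmem, hm0]
      constructor
      · rw [pvMem_incs]
        exact ⟨M, hMmem, Or.inl (by omega)⟩
      · push_cast; positivity
    · have hmM : m ≤ M.toNat := pvRef_le L M.toNat
      have hmI : (1 : Int) ≤ (m : Int) := by exact_mod_cast hm0
      rw [hSmem]
      constructor
      · rw [pvMem_incs]
        refine ⟨M, hMmem, ?_⟩
        by_cases h : (m : Int) = M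
        · exact Or.inl h
        · exact Or.inr ⟨hmI, by omega⟩
      · rw [hcge _ hmI]
        exact pvRef_spec L M.toNat hm0
  -- every element of S is ≤ m
  have hSle : ∀ y ∈ S, y ≤ ((m : Nat) : Int) := by
    intro y hy
    rw [hSmem] at hy
    obtain ⟨hyi, hyc⟩ := hy
    by_cases hy0 : y ≤ 0
    · have : (0 : Int) ≤ (m : Int) := by positivity
      omega
    · have hy1 : (1 : Int) ≤ y := by omega
      have hyM : y ≤ M := by
        rw [pvMem_incs] at hyi
        obtain ⟨x, hx, h | h⟩ := hyi
        · have := hMmax x hx; omega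
        · have := hMmax x hx; omega
      have : y.toNat ≤ m := by
        apply pvRef_greatest L M.toNat y.toNat (by omega) (by omega)
        have hcast : ((y.toNat : Nat) : Int) = y := by omega
        rw [hcast, ← hcge _ hy1]
        exact hyc
      omega
  -- conclude: max? S = some m
  obtain ⟨v, hv⟩ : ∃ v, PySem.List.max? S (fun k => k) = some v := by
    cases hmx : PySem.List.max? S (fun k => k) with
    | none =>
      exfalso
      rw [PySem.List.max?_eq_none_iff] at hmx
      rw [hmx] at hmS
      simp at hmS
    | some v => exact ⟨v, rfl⟩
  have hvS : v ∈ S := PySem.List.max?_mem hv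
  have h1 : v ≤ ((m : Nat) : Int) := hSle v hvS
  have h2 : ((m : Nat) : Int) ≤ v := PySem.List.max?_isMax hv _ hmS
  rw [hv]
  simp only [Option.getD_some]
  omega
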